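-- pv_equiv track=rewrite | github.com/DVL-Sejong/COVID_DataProcessor | COVID_DataProcessor/preprocess/preprocess.py | target_to_daily
-- ===== SOURCE A (Python) =====
-- def target_to_daily(target_values):
--     daily_values = []
--
--     zero_ended = False
--     for i in range(len(target_values) - 1):
--         if zero_ended is False and target_values[i] != 0:
--             zero_ended = True
--             daily_values.append(0)
--         elif zero_ended is False and target_values[i] == 0:
--             daily_values.append(target_values[i])
--         else:
--             daily_values.append(target_values[i + 1] - target_values[i])
--
--     return daily_values
-- ===== SOURCE B (Python) =====
-- def target_to_daily(target_values):
--     f = next((i for i, v in enumerate(target_values) if v != 0), len(target_values))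
--     return [0 if i <= f else target_values[i + 1] - target_values[i]
--             for i in range(len(target_values) - 1)]
-- ===== Notes on version B (the rewrite author's own statement) =====
-- stated objective: simpler
-- what changed: Replaces the stateful loop with a boolean flag by first locating the first-nonzero boundary index, then producing the output with a single stateless comprehension (0 up to and including the boundary, adjacent differences after it).
import Mathlib
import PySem

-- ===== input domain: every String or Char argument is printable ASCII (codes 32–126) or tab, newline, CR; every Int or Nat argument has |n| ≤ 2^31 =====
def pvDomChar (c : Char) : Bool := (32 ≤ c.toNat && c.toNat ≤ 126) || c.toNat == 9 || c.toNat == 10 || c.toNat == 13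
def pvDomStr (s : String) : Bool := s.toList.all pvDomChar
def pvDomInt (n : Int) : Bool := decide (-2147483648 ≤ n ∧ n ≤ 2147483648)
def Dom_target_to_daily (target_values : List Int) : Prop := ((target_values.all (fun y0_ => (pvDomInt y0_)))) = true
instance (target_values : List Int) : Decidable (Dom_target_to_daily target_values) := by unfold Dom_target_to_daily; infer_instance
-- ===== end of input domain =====

-- B replaces A's stateful flag loop by locating the first-nonzero boundary, then one stateless mapping pass (objective: simpler).

-- ===== PORT A =====
def target_to_daily (target_values : List Int) : List Int :=
  ((PySem.List.pyRange 0 ((target_values.length : Int) - 1) 1).foldl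
    (fun (s : Bool × List Int) i =>
      if s.1 = false ∧ PySem.List.pyGetD target_values i 0 ≠ 0 then
        (true, s.2 ++ [0])
      else if s.1 = false ∧ PySem.List.pyGetD target_values i 0 = 0 then
        (s.1, s.2 ++ [PySem.List.pyGetD target_values i 0])
      else
        (s.1, s.2 ++ [PySem.List.pyGetD target_values (i + 1) 0 - PySem.List.pyGetD target_values i 0]))
    (false, [])).2

-- ===== PORT B =====
-- helper: index of the first nonzero value, length if none (Python's `next(... , len(...))`)
def firstNonzero : List Int → Nat
  | [] => 0
  | v :: rest => if v ≠ 0 then 0 else firstNonzero rest + 1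

def target_to_daily_alt (target_values : List Int) : List Int :=
  let f : Int := (firstNonzero target_values : Int)
  (PySem.List.pyRange 0 ((target_values.length : Int) - 1) 1).map
    (fun i => if i ≤ f then 0
              else PySem.List.pyGetD target_values (i + 1) 0 - PySem.List.pyGetD target_values i 0)

-- ===== PRECONDITION & SPEC =====
def Spec_target_to_daily (target_values : List Int) (out : List Int) : Prop := out = target_to_daily_alt target_values
instance (target_values : List Int) (out : List Int) : Decidable (Spec_target_to_daily target_values out) := by unfold Spec_target_to_daily; infer_instance

-- ===== CLAIM (what is proved, stated in full; the proofs are below) =====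
def Claim_equal_target_to_daily : Prop := ∀ (target_values : List Int), Dom_target_to_daily target_values → Spec_target_to_daily target_values (target_to_daily target_values)

-- ===== LEMMAS AND PROOFS =====

theorem getD_lt_firstNonzero (tv : List Int) (k : Nat) (hk : k < firstNonzero tv) :
    tv.getD k 0 = 0 := by
  induction tv generalizing k with
  | nil => simp [firstNonzero] at hk
  | cons v rest ih =>
    simp only [firstNonzero] at hk
    by_cases hv : v ≠ 0
    · simp [hv] at hk
    · simp only [hv, ite_false] at hk
      rw [not_not] at hv
      cases k with
      | zero => simpa using hv
      | succ k' =>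
        simp only [List.getD_cons_succ]
        exact ih k' (by omega)

theorem getD_firstNonzero_ne (tv : List Int) (h : firstNonzero tv < tv.length) :
    tv.getD (firstNonzero tv) 0 ≠ 0 := by
  induction tv with
  | nil => simp at h
  | cons v rest ih =>
    simp only [firstNonzero] at h ⊢
    by_cases hv : v ≠ 0
    · simpa [hv]
    · simp only [hv, ite_false] at h ⊢
      simp only [List.getD_cons_succ]
      exact ih (by simpa [List.length_cons] using Nat.lt_of_succ_lt_succ (by simpa using h))

theorem loop_inv (tv : List Int) (k : Nat) :
    ∀ (a : Int) (acc : List Int) (b : Bool), 0 ≤ a →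
      a + (k : Int) = (tv.length : Int) - 1 →
      b = decide ((firstNonzero tv : Int) < a) →
      ((PySem.List.pyRange a ((tv.length : Int) - 1) 1).foldl
        (fun (s : Bool × List Int) i =>
          if s.1 = false ∧ PySem.List.pyGetD tv i 0 ≠ 0 then
            (true, s.2 ++ [0])
          else if s.1 = false ∧ PySem.List.pyGetD tv i 0 = 0 then
            (s.1, s.2 ++ [PySem.List.pyGetD tv i 0])
          else
            (s.1, s.2 ++ [PySem.List.pyGetD tv (i + 1) 0 - PySem.List.pyGetD tv i 0]))
        (b, acc)).2
      = acc ++ (PySem.List.pyRange a ((tv.length : Int) - 1) 1).map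
          (fun i => if i ≤ ((firstNonzero tv : Nat) : Int) then 0
                    else PySem.List.pyGetD tv (i + 1) 0 - PySem.List.pyGetD tv i 0) := by
  induction k with
  | zero =>
    intro a acc b ha hend hb
    rw [PySem.List.pyRange_one_eq_nil (by omega)]
    simp
  | succ k ih =>
    intro a acc b ha hend hb
    have hlt : a < (tv.length : Int) - 1 := by omega
    rw [PySem.List.pyRange_one_cons hlt]
    set F : Nat := firstNonzero tv with hF
    have haN : a.toNat < tv.length := by omega
    have hget : PySem.List.pyGetD tv a 0 = tv.getD a.toNat 0 := by
      rw [PySem.List.pyGetD_eq_getElem tv 0 ha (by omega)]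
      exact (List.getD_eq_getElem tv 0 haN).symm
    simp only [List.foldl_cons, List.map_cons]
    by_cases hb' : (F : Int) < a
    · -- flag already true
      have hbt : b = true := by simp [hb, hb']
      simp only [hbt]
      rw [if_neg (by simp), if_neg (by simp)]
      rw [ih (a + 1) _ _ (by omega) (by omega) (by simp [hF]; omega)]
      rw [if_neg (by omega : ¬ a ≤ (F : Int))]
      simp
    · -- flag still false, so F ≥ a
      have hbf : b = false := by simp [hb, hb']
      have hz0 : tv.getD a.toNat 0 = tv[a.toNat]?.getD 0 := by
        simp [List.getD]
      by_cases hz : tv.getD a.toNat 0 = 0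
      · -- current value is zero, hence a < F
        have haF : a < (F : Int) := by
          rcases lt_or_eq_of_le (show a ≤ (F : Int) by omega) with h | h
          · exact h
          · exfalso
            have hFlen : F < tv.length := by omega
            have hne := getD_firstNonzero_ne tv hFlen
            have hEq : a.toNat = F := by omega
            rw [hEq] at hz
            exact hne hz
        have hz' : tv[a.toNat]?.getD 0 = 0 := by rw [← hz0]; exact hz
        simp only [hbf]
        rw [if_neg (by simp [hget, hz']), if_pos (by simp [hget, hz'])]
        rw [ih (a + 1) _ _ (by omega) (by omega) (by simp; omega)]
        rw [if_pos (by omega : a ≤ (F : Int))]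
        simp [hget, hz']
      · -- current value is nonzero, hence a = F
        have haF : a = (F : Int) := by
          rcases lt_or_eq_of_le (show a ≤ (F : Int) by omega) with h | h
          · exact absurd (getD_lt_firstNonzero tv a.toNat (by omega)) hz
          · exact h
        have hz' : ¬ tv[a.toNat]?.getD 0 = 0 := by rw [← hz0]; exact hz
        simp only [hbf]
        rw [if_pos (by simp [hget, hz'])]
        rw [ih (a + 1) _ _ (by omega) (by omega) (by simp; omega)]
        rw [if_pos (by omega : a ≤ (F : Int))]
        simp

-- ===== VERDICT (by name: the statement is the Claim_ definition above) =====
theorem target_to_daily_spec : Claim_equal_target_to_daily := by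
  intro tv _
  unfold Spec_target_to_daily target_to_daily target_to_daily_alt
  cases h : tv.length with
  | zero =>
    rw [show ((((0:Nat)):Int) - 1) = -1 by norm_num,
        PySem.List.pyRange_one_eq_nil (by norm_num)]
    simp
  | succ n =>
    rw [← h,
        loop_inv tv n 0 [] false (by omega) (by omega) (by simp)]
    simp
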